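-- pv_equiv track=rewrite | github.com/lalakate/5th-semester | ОКС/lab2/ports.py | deBitStuffing
-- ===== SOURCE A (Python) =====
-- SEARCH_BITS = "1000111"
--
-- SEARCH_LEN = len(SEARCH_BITS)
--
-- def deBitStuffing(packet):
--     left = ""
--     destuffedPacket = packet[:8]
--     for bit in packet[8:]:
--         left += bit
--         if left[:-1] == SEARCH_BITS:
--             destuffedPacket += left[:-1]
--             left = ""
--         if len(left) == SEARCH_LEN + 1:
--             destuffedPacket += left[0]
--             left = left[1:]
--     if left != "":
--         destuffedPacket += left
--     return destuffedPacket
-- ===== SOURCE B (Python) =====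
-- SEARCH_BITS = "1000111"
--
-- def deBitStuffing(packet):
--     out = list(packet[:8])
--     window = ""
--     skip = False
--     for bit in packet[8:]:
--         if skip:
--             skip = False
--             continue
--         out.append(bit)
--         window = (window + bit)[-7:]
--         if window == SEARCH_BITS:
--             skip = True
--             window = ""
--     return "".join(out)
-- ===== Notes on version B (the rewrite author's own statement) =====
-- stated objective: simpler
-- what changed: B emits each kept bit immediately into a list (joined once) with a skip flag and a capped last-7 window, instead of A's lagging 8-slot buffer with age-out emission, repeated string concatenation and a final flush.
import Mathlib
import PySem

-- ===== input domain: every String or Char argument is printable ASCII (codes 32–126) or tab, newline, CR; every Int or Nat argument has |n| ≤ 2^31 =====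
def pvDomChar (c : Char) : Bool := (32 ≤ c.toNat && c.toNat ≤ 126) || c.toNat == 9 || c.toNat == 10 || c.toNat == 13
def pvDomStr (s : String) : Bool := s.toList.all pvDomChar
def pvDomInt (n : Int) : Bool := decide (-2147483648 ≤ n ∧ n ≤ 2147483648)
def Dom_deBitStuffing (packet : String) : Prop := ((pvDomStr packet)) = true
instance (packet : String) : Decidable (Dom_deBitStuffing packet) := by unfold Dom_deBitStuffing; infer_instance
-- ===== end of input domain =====

-- B replaces A's lagging 8-slot buffer/age-out logic by immediate emission with a skip flag; same linear cost, simpler.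

-- ===== PORT A =====
-- SEARCH_BITS = "1000111", SEARCH_LEN = 7
def pvSearchBits : List Char := ['1','0','0','0','1','1','1']

-- one iteration of A's for-loop; state = (destuffedPacket, left)
-- left[:-1] = dropLast; left[0] on a string of length 8 = take 1; left[1:] = drop 1
def pvAStep (st : List Char × List Char) (bit : Char) : List Char × List Char :=
  let left := st.2 ++ [bit]
  let dest := st.1
  let p :=
    if left.dropLast = pvSearchBits then (dest ++ left.dropLast, ([] : List Char))
    else (dest, left)
  if p.2.length = 7 + 1 then (p.1 ++ p.2.take 1, p.2.drop 1) else p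

def deBitStuffing (packet : String) : String :=
  let cs := packet.toList
  -- packet[:8] / packet[8:] with nonnegative bounds = take 8 / drop 8 (exact)
  let st := (cs.drop 8).foldl pvAStep (cs.take 8, ([] : List Char))
  String.ofList (if st.2 ≠ [] then st.1 ++ st.2 else st.1)

-- ===== PORT B =====
-- one iteration of B's loop; state = (out, window, skip)
-- (window + bit)[-7:] = drop (length - 7) (Nat subtraction clamps at 0, exactly Python's [-7:])
def pvBStep (st : List Char × List Char × Bool) (bit : Char) : List Char × List Char × Bool :=
  if st.2.2 then (st.1, st.2.1, false)
  else
    let out := st.1 ++ [bit]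
    let w := st.2.1 ++ [bit]
    let w := w.drop (w.length - 7)
    if w = pvSearchBits then (out, ([] : List Char), true) else (out, w, false)

def deBitStuffing_alt (packet : String) : String :=
  let cs := packet.toList
  let st := (cs.drop 8).foldl pvBStep (cs.take 8, ([] : List Char), false)
  String.ofList st.1

-- ===== PRECONDITION & SPEC =====
def Spec_deBitStuffing (packet : String) (out : String) : Prop := out = deBitStuffing_alt packet
instance (packet : String) (out : String) : Decidable (Spec_deBitStuffing packet out) := by unfold Spec_deBitStuffing; infer_instance

-- ===== CLAIM (what is proved, stated in full; the proofs are below) =====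
def Claim_equal_deBitStuffing : Prop := ∀ (packet : String), Dom_deBitStuffing packet → Spec_deBitStuffing packet (deBitStuffing packet)

-- ===== LEMMAS AND PROOFS =====

-- coupling invariant between A's state (dest, left) and B's state (out, window, skip)
def pvInv (a : List Char × List Char) (b : List Char × List Char × Bool) : Prop :=
  b.1 = a.1 ++ a.2 ∧
  (if b.2.2 then b.2.1 = [] ∧ a.2 = pvSearchBits
   else b.2.1 = a.2 ∧ a.2 ≠ pvSearchBits ∧ a.2.length ≤ 7)

theorem pvStep_inv (a : List Char × List Char) (b : List Char × List Char × Bool)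
    (h : pvInv a b) (bit : Char) : pvInv (pvAStep a bit) (pvBStep b bit) := by
  obtain ⟨a1, a2⟩ := a
  obtain ⟨b1, b2, b3⟩ := b
  cases b3 with
  | true =>
      obtain ⟨h1, h2, h3⟩ := h
      simp only at h1 h2 h3
      subst h1 h2 h3
      simp [pvInv, pvAStep, pvBStep, pvSearchBits]
  | false =>
      obtain ⟨h1, h2, h3, h4⟩ := h
      simp only at h1 h2 h3 h4
      subst h1 h2
      simp only [pvAStep, pvBStep, pvInv]
      rw [List.dropLast_concat, if_neg h3]
      have htd : List.take 1 (b2 ++ [bit]) ++ (b2 ++ [bit]).tail = b2 ++ [bit] := by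
        simpa [List.drop_one] using List.take_append_drop 1 (b2 ++ [bit])
      by_cases hl : b2.length = 7
      · have hlen : (b2 ++ [bit]).length = 7 + 1 := by simp [hl]
        have e1 : (b2 ++ [bit]).length - 7 = 1 := by omega
        rw [if_pos hlen, e1]
        by_cases hw : (b2 ++ [bit]).drop 1 = pvSearchBits
        · rw [if_pos hw]
          refine ⟨?_, ?_⟩
          · simp [List.append_assoc, htd]
          · simp [List.drop_one] at hw
            simp [hw]
        · rw [if_neg hw]
          refine ⟨?_, ?_⟩
          · simp [List.append_assoc, htd]
          · simp [List.drop_one] at hw ⊢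
            refine ⟨hw, ?_⟩
            have : (b2 ++ [bit]).tail.length = 7 := by
              simp [List.length_tail, hlen]
            omega
      · have hlen : (b2 ++ [bit]).length ≠ 7 + 1 := by simp; omega
        have e0 : (b2 ++ [bit]).length - 7 = 0 := by simp; omega
        rw [if_neg hlen, e0, List.drop_zero]
        by_cases hw : b2 ++ [bit] = pvSearchBits
        · rw [if_pos hw]
          exact ⟨by simp, by simp [hw]⟩
        · rw [if_neg hw]
          refine ⟨by simp, ?_⟩
          simp [hw]
          omega

theorem pvFold_inv (l : List Char) (a : List Char × List Char) (b : List Char × List Char × Bool)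
    (h : pvInv a b) : pvInv (l.foldl pvAStep a) (l.foldl pvBStep b) := by
  induction l generalizing a b with
  | nil => exact h
  | cons c cs ih => exact ih _ _ (pvStep_inv a b h c)

-- ===== VERDICT (by name: the statement is the Claim_ definition above) =====
theorem deBitStuffing_spec : Claim_equal_deBitStuffing := by
  intro packet _
  unfold Spec_deBitStuffing deBitStuffing deBitStuffing_alt
  have h0 : pvInv (packet.toList.take 8, ([] : List Char))
      (packet.toList.take 8, ([] : List Char), false) := by
    simp [pvInv, pvSearchBits]
  have h := pvFold_inv (packet.toList.drop 8) _ _ h0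
  obtain ⟨h1, -⟩ := h
  simp only [h1]
  split <;> simp_all
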